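-- pv_equiv track=rewrite | github.com/GRANTPRIME/Perfomance_Lab | task1/task1.py | circular_array_path
-- ===== SOURCE A (Python) =====
-- def circular_array_path(n, m):
--     i = 1
--     result = []
--     while True:
--         result.append(str(i))
--         i = 1 + (i + m - 2) % n
--         if i == 1:
--             break
--     return result
-- ===== SOURCE B (Python) =====
-- def circular_array_path(n, m):
--     # closed form: position after k steps is 1 + (k*(m-1)) % n; orbit length = |n| / gcd(|n|, |m-1|)
--     d = m - 1
--     a, b = abs(n), abs(d)
--     while b:
--         a, b = b, a % b
--     length = abs(n) // a
--     return [str(1 + (k * d) % n) for k in range(length)]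
-- ===== Notes on version B (the rewrite author's own statement) =====
-- stated objective: alternative
-- what changed: B replaces A's simulate-until-return-to-1 loop with a gcd-based computation of the orbit length L = |n|/gcd(|n|,|m-1|) and emits each position directly by the closed form 1 + (k*(m-1)) % n for k in range(L).
import Mathlib
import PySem

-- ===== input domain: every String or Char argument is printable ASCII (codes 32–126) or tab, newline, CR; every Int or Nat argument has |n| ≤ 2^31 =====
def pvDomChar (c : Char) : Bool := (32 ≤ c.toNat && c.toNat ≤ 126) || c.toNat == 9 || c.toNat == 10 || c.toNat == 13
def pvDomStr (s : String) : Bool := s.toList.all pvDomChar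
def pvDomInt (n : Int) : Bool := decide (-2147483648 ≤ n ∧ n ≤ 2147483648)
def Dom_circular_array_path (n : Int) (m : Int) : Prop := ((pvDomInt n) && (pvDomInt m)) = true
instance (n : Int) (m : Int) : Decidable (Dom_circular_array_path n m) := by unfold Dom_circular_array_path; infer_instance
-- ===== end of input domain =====

-- B replaces A's simulate-until-return loop by the closed form 1 + (k*(m-1)) % n over k < |n|/gcd(|n|,|m-1|).


-- ===== PORT A =====
-- the while-True loop; the fuel n.natAbs only makes it total, it is proved sufficient for n ≠ 0
def caLoopA (n m : Int) : Int → List String → Nat → List String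
  | _, acc, 0 => acc
  | i, acc, fuel+1 =>
    if 1 + PySem.Int.mod (i + m - 2) n = 1 then acc ++ [PySem.Int.toStr i]
    else caLoopA n m (1 + PySem.Int.mod (i + m - 2) n) (acc ++ [PySem.Int.toStr i]) fuel

def circular_array_path (n : Int) (m : Int) : List String := caLoopA n m 1 [] n.natAbs

-- ===== PORT B =====
-- Source B's hand-written Euclid loop: while b: a, b = b, a % b
def pyGcdLoop : Nat → Nat → Nat
  | a, 0 => a
  | a, b+1 => pyGcdLoop (b+1) (a % (b+1))
termination_by a b => b
decreasing_by exact Nat.mod_lt _ (Nat.succ_pos b)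

def circular_array_path_alt (n : Int) (m : Int) : List String :=
  let d := m - 1
  let g := pyGcdLoop n.natAbs d.natAbs
  let length := n.natAbs / g
  (List.range length).map (fun k => PySem.Int.toStr (1 + PySem.Int.mod ((k : Int) * d) n))

-- ===== PRECONDITION & SPEC =====
-- Python A raises ZeroDivisionError ('% n') exactly when n == 0
def Pre_circular_array_path (n : Int) (m : Int) : Prop := n ≠ 0
instance (n : Int) (m : Int) : Decidable (Pre_circular_array_path n m) := by unfold Pre_circular_array_path; infer_instance
def pvWitness_circular_array_path : Int × Int := (6, 4)

def Spec_circular_array_path (n : Int) (m : Int) (out : List String) : Prop := out = circular_array_path_alt n m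
instance (n : Int) (m : Int) (out : List String) : Decidable (Spec_circular_array_path n m out) := by unfold Spec_circular_array_path; infer_instance

-- ===== CLAIM (what is proved, stated in full; the proofs are below) =====
def Claim_equal_circular_array_path : Prop := ∀ (n : Int) (m : Int), Dom_circular_array_path n m → Pre_circular_array_path n m → Spec_circular_array_path n m (circular_array_path n m)

-- ===== LEMMAS AND PROOFS =====

theorem pyGcdLoop_eq (a b : Nat) : pyGcdLoop a b = Nat.gcd a b := by
  fun_induction pyGcdLoop a b with
  | case1 a => simp
  | case2 a b ih => rw [ih, Nat.gcd_comm a (b+1), Nat.gcd_rec (b+1) a, Nat.gcd_comm]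

-- Python %: adding a multiple-reduced summand does not change the residue
theorem pymod_shift (a b n : Int) :
    PySem.Int.mod (PySem.Int.mod a n + b) n = PySem.Int.mod (a + b) n := by
  simp only [PySem.Int.mod]
  rw [Int.add_fmod, Int.fmod_fmod_of_dvd _ dvd_rfl, ← Int.add_fmod]

-- divisibility characterisation of 'the walk is back at 1 after k steps'
theorem dvd_iff_orbit (n' d' k : Nat) (hn : n' ≠ 0) :
    n' ∣ k * d' ↔ (n' / Nat.gcd n' d') ∣ k := by
  set g := Nat.gcd n' d' with hg
  have hgpos : 0 < g := Nat.gcd_pos_of_pos_left _ (Nat.pos_of_ne_zero hn)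
  have hnd : g ∣ n' := Nat.gcd_dvd_left _ _
  have hdd : g ∣ d' := Nat.gcd_dvd_right _ _
  obtain ⟨L, hL⟩ := hnd
  obtain ⟨e, he⟩ := hdd
  have hLg : n' / g = L := by rw [hL, Nat.mul_div_cancel_left _ hgpos]
  have heg : d' / g = e := by rw [he, Nat.mul_div_cancel_left _ hgpos]
  have hcop : Nat.Coprime L e := by
    have h := Nat.coprime_div_gcd_div_gcd (m := n') (n := d') hgpos
    rwa [← hg, hLg, heg] at h
  rw [hLg, hL, he]
  constructor
  · intro h
    have h' : g * L ∣ g * (k * e) := by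
      have : k * (g * e) = g * (k * e) := by ring
      rwa [this] at h
    have : L ∣ k * e := (Nat.mul_dvd_mul_iff_left hgpos).1 h'
    exact hcop.dvd_of_dvd_mul_right this
  · intro h
    obtain ⟨c, hc⟩ := h
    exact ⟨c * e, by rw [hc]; ring⟩

-- the loop, started at the k-th closed-form position, emits exactly the remaining orbit
theorem caLoopA_inv (n m : Int) (hn : n ≠ 0) :
    ∀ (fuel k : Nat) (acc : List String),
      k < n.natAbs / Nat.gcd n.natAbs (m-1).natAbs →
      n.natAbs / Nat.gcd n.natAbs (m-1).natAbs - k ≤ fuel →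
      caLoopA n m (1 + PySem.Int.mod ((k : Int) * (m-1)) n) acc fuel =
        acc ++ (List.range' k (n.natAbs / Nat.gcd n.natAbs (m-1).natAbs - k)).map
          (fun j => PySem.Int.toStr (1 + PySem.Int.mod ((j : Int) * (m-1)) n)) := by
  set L := n.natAbs / Nat.gcd n.natAbs (m-1).natAbs with hLdef
  have hchar : ∀ k : Nat, (PySem.Int.mod ((k : Int) * (m-1)) n = 0) ↔ L ∣ k := by
    intro k
    rw [PySem.Int.mod_eq_zero_iff_dvd]
    rw [← Int.natAbs_dvd_natAbs, Int.natAbs_mul, Int.natAbs_natCast]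
    exact dvd_iff_orbit n.natAbs (m-1).natAbs k (by simpa using hn)
  intro fuel
  induction fuel with
  | zero => intro k acc hk hfuel; omega
  | succ fuel ih =>
    intro k acc hk hfuel
    rw [caLoopA]
    have hstep : 1 + PySem.Int.mod (1 + PySem.Int.mod ((k : Int) * (m-1)) n + m - 2) n
        = 1 + PySem.Int.mod (((k : Nat) + 1 : Nat) * (m-1)) n := by
      have h1 : (1 : Int) + PySem.Int.mod ((k : Int) * (m-1)) n + m - 2
          = PySem.Int.mod ((k : Int) * (m-1)) n + (m - 1) := by ring
      rw [h1, pymod_shift]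
      congr 1
      congr 1
      push_cast
      ring
    rw [hstep]
    by_cases hdone : PySem.Int.mod (((k : Nat) + 1 : Nat) * (m-1) : Int) n = 0
    · -- returned to 1: L ∣ k+1 and k+1 ≤ L force k+1 = L
      have hdvd : L ∣ k + 1 := (hchar (k+1)).1 (by exact_mod_cast hdone)
      have hkL : k + 1 = L := Nat.le_antisymm hk (Nat.le_of_dvd (Nat.succ_pos k) hdvd)
      have : L - k = 1 := by omega
      rw [if_pos (by rw [hdone]; ring), this]
      simp [List.range'_one]
    · have hne : ¬ (1 + PySem.Int.mod (((k : Nat) + 1 : Nat) * (m-1) : Int) n = 1) := by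
        intro h; exact hdone (by omega)
      rw [if_neg hne]
      have hklt : k + 1 < L := by
        rcases Nat.lt_or_ge (k+1) L with h | h
        · exact h
        · exfalso
          have : k + 1 = L := by omega
          exact hdone ((hchar (k+1)).2 (this ▸ dvd_refl L))
      have := ih (k+1) (acc ++ [PySem.Int.toStr (1 + PySem.Int.mod ((k : Int) * (m-1)) n)])
        hklt (by omega)
      rw [this]
      have hrange : List.range' k (L - k) = k :: List.range' (k+1) (L - (k+1)) := by
        have h1 : L - k = (L - (k+1)) + 1 := by omega
        rw [h1, List.range'_succ]
      rw [hrange]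
      simp

-- ===== VERDICT (by name: the statement is the Claim_ definition above) =====
theorem circular_array_path_spec : Claim_equal_circular_array_path := by
  intro n m _ hn
  unfold Spec_circular_array_path circular_array_path circular_array_path_alt
  simp only [pyGcdLoop_eq]
  set L := n.natAbs / Nat.gcd n.natAbs (m-1).natAbs with hLdef
  have hn' : n.natAbs ≠ 0 := by simpa using hn
  have hgdvd : Nat.gcd n.natAbs (m-1).natAbs ∣ n.natAbs := Nat.gcd_dvd_left _ _
  have hgpos : 0 < Nat.gcd n.natAbs (m-1).natAbs :=
    Nat.gcd_pos_of_pos_left _ (Nat.pos_of_ne_zero hn')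
  have hLpos : 0 < L := Nat.div_pos (Nat.le_of_dvd (Nat.pos_of_ne_zero hn') hgdvd) hgpos
  have hLle : L ≤ n.natAbs := Nat.div_le_self _ _
  have h0 := caLoopA_inv n m hn n.natAbs 0 [] hLpos (by omega)
  have hone : 1 + PySem.Int.mod ((0 : Nat) * (m-1) : Int) n = 1 := by
    simp [PySem.Int.mod]
  rw [hone] at h0
  rw [h0, List.range_eq_range']
  simp only [Nat.sub_zero, List.nil_append]
  rw [← hLdef]
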